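-- pv_equiv track=rewrite | github.com/thealper2/codewars-solutions | 7-kyu/coding_3_min_special_factor.py | sc
-- ===== SOURCE A (Python) =====
-- def sc(n):
--     result = []
--     bin_n = bin(n)[2:]
--     for i in range(1, n + 1):
--         if not n % i:
--             bin_i = bin(i)[2:]
--             if bin_i in bin_n:
--                 result.append(i)
--
--     return result
-- ===== SOURCE B (Python) =====
-- def sc(n):
--     # divisors found in pairs up to sqrt(n); small divisors ascending, cofactors
--     # collected and reversed, then the same binary-substring test applied once.
--     bin_n = bin(n)[2:]
--     small = []
--     large = []
--     i = 1
--     while i * i <= n: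
--         if n % i == 0:
--             small.append(i)
--             j = n // i
--             if j != i:
--                 large.append(j)
--         i += 1
--     return [d for d in small + large[::-1] if bin(d)[2:] in bin_n]
-- ===== Notes on version B (the rewrite author's own statement) =====
-- stated objective: faster
-- what changed: B enumerates divisors in pairs up to sqrt(n) (small divisors ascending, cofactors collected and reversed) instead of trial-dividing every candidate up to n, then applies the same binary-substring test.
import Mathlib
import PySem

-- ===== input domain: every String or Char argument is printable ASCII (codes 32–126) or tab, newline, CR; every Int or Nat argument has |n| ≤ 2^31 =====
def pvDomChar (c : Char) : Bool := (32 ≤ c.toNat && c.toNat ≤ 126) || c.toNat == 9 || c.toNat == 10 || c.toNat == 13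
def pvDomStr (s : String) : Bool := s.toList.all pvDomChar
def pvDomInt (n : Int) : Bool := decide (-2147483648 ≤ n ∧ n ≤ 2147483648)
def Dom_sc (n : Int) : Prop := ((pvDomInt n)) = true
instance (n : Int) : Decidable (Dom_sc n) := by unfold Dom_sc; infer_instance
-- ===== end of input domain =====

-- B replaces A's trial division over 1..n by divisor-pair enumeration up to √n
-- (small divisors ascending, cofactors reversed), same binary-substring test.

-- ===== PORT A =====
-- bin(x)[2:], shared by both Pythons (library call)
def pyBinTail (x : Int) : List Char :=
  PySem.List.slice (PySem.Int.toBinChars0b x) (some 2) none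

def sc (n : Int) : List Int :=
  let bin_n := pyBinTail n
  (PySem.List.pyRange 1 (n + 1) 1).foldl
    (fun result i =>
      if PySem.Int.mod n i == 0 then
        (if PySem.Chars.isIn (pyBinTail i) bin_n then result ++ [i] else result)
      else result) []

-- ===== PORT B =====
-- the 'while i * i <= n' loop of Source B, carrying the two accumulators
def scAltLoop (n i : Int) (small large : List Int) : List Int × List Int :=
  if h : i * i ≤ n then
    if PySem.Int.mod n i == 0 then
      let j := PySem.Int.floordiv n i
      scAltLoop n (i + 1) (small ++ [i]) (if j ≠ i then large ++ [j] else large)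
    else scAltLoop n (i + 1) small large
  else (small, large)
termination_by (n + 1 - i).toNat
decreasing_by
  all_goals
    have hii : i ≤ i * i := by
      by_cases h0 : i ≤ 0
      · exact h0.trans (mul_self_nonneg i)
      · nlinarith [mul_self_nonneg i]
    omega

def sc_alt (n : Int) : List Int :=
  let bin_n := pyBinTail n
  let p := scAltLoop n 1 [] []
  (p.1 ++ p.2.reverse).filter (fun d => PySem.Chars.isIn (pyBinTail d) bin_n)

-- ===== PRECONDITION & SPEC =====
def Spec_sc (n : Int) (out : List Int) : Prop := out = sc_alt n
instance (n : Int) (out : List Int) : Decidable (Spec_sc n out) := by unfold Spec_sc; infer_instance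

-- ===== CLAIM (what is proved, stated in full; the proofs are below) =====
def Claim_equal_sc : Prop := ∀ (n : Int), Dom_sc n → Spec_sc n (sc n)

-- ===== LEMMAS AND PROOFS =====

-- the small divisors (ascending) and the cofactors (in order of discovery) the loop produces
def smalls (n i : Int) : List Int :=
  if h : i * i ≤ n then
    if PySem.Int.mod n i == 0 then i :: smalls n (i + 1) else smalls n (i + 1)
  else []
termination_by (n + 1 - i).toNat
decreasing_by
  all_goals
    have hii : i ≤ i * i := by
      by_cases h0 : i ≤ 0
      · exact h0.trans (mul_self_nonneg i)
      · nlinarith [mul_self_nonneg i]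
    omega

def larges (n i : Int) : List Int :=
  if h : i * i ≤ n then
    if PySem.Int.mod n i == 0 then
      if PySem.Int.floordiv n i ≠ i then PySem.Int.floordiv n i :: larges n (i + 1)
      else larges n (i + 1)
    else larges n (i + 1)
  else []
termination_by (n + 1 - i).toNat
decreasing_by
  all_goals
    have hii : i ≤ i * i := by
      by_cases h0 : i ≤ 0
      · exact h0.trans (mul_self_nonneg i)
      · nlinarith [mul_self_nonneg i]
    omega

lemma scAltLoop_eq (n i : Int) (s l : List Int) :
    scAltLoop n i s l = (s ++ smalls n i, l ++ larges n i) := by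
  fun_induction scAltLoop n i s l with
  | case1 i s l h hmod j IH =>
      rw [smalls, larges]
      simp only [dif_pos h, if_pos hmod]
      by_cases hj : PySem.Int.floordiv n i ≠ i
      · rw [dif_pos hj] at IH
        simp [j, hj, IH]
      · rw [dif_neg hj] at IH
        simp [j, hj, IH]
  | case2 i s l h hmod ih =>
      rw [smalls, larges]
      simp [dif_pos h, hmod, ih]
  | case3 i s l h =>
      rw [smalls, larges]
      simp [dif_neg h]

lemma mem_smalls (n i x : Int) : 1 ≤ i →
    (x ∈ smalls n i ↔ i ≤ x ∧ x * x ≤ n ∧ PySem.Int.mod n x = 0) := by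
  fun_induction smalls n i with
  | case1 i h hmod IH =>
      intro hi
      rw [List.mem_cons, IH (by omega)]
      simp only [beq_iff_eq] at hmod
      constructor
      · rintro (rfl | ⟨h1, h2, h3⟩)
        · exact ⟨le_refl _, h, hmod⟩
        · exact ⟨by omega, h2, h3⟩
      · rintro ⟨h1, h2, h3⟩
        rcases eq_or_lt_of_le h1 with rfl | h4
        · exact Or.inl rfl
        · exact Or.inr ⟨by omega, h2, h3⟩
  | case2 i h hmod IH =>
      intro hi
      rw [IH (by omega)]
      simp only [beq_iff_eq] at hmod
      constructor
      · rintro ⟨h1, h2, h3⟩; exact ⟨by omega, h2, h3⟩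
      · rintro ⟨h1, h2, h3⟩
        rcases eq_or_lt_of_le h1 with rfl | h4
        · exact absurd h3 hmod
        · exact ⟨by omega, h2, h3⟩
  | case3 i h =>
      intro hi
      simp only [List.not_mem_nil, false_iff]
      rintro ⟨h1, h2, h3⟩
      nlinarith

lemma mem_larges (n i x : Int) : 1 ≤ i →
    (x ∈ larges n i ↔ ∃ d, i ≤ d ∧ d * d ≤ n ∧ PySem.Int.mod n d = 0 ∧
      PySem.Int.floordiv n d ≠ d ∧ x = PySem.Int.floordiv n d) := by
  fun_induction larges n i with
  | case1 i h hmod hj IH =>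
      intro hi
      rw [List.mem_cons, IH (by omega)]
      simp only [beq_iff_eq] at hmod
      constructor
      · rintro (rfl | ⟨d, h1, h2, h3, h4, h5⟩)
        · exact ⟨i, le_refl _, h, hmod, hj, rfl⟩
        · exact ⟨d, by omega, h2, h3, h4, h5⟩
      · rintro ⟨d, h1, h2, h3, h4, h5⟩
        rcases eq_or_lt_of_le h1 with rfl | h6
        · exact Or.inl h5
        · exact Or.inr ⟨d, by omega, h2, h3, h4, h5⟩
  | case2 i h hmod hj IH =>
      intro hi
      rw [IH (by omega)]
      simp only [not_not] at hj
      constructor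
      · rintro ⟨d, h1, h2, h3, h4, h5⟩; exact ⟨d, by omega, h2, h3, h4, h5⟩
      · rintro ⟨d, h1, h2, h3, h4, h5⟩
        rcases eq_or_lt_of_le h1 with rfl | h6
        · exact absurd hj h4
        · exact ⟨d, by omega, h2, h3, h4, h5⟩
  | case3 i h hmod IH =>
      intro hi
      rw [IH (by omega)]
      simp only [beq_iff_eq] at hmod
      constructor
      · rintro ⟨d, h1, h2, h3, h4, h5⟩; exact ⟨d, by omega, h2, h3, h4, h5⟩
      · rintro ⟨d, h1, h2, h3, h4, h5⟩
        rcases eq_or_lt_of_le h1 with rfl | h6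
        · exact absurd h3 hmod
        · exact ⟨d, by omega, h2, h3, h4, h5⟩
  | case4 i h =>
      intro hi
      simp only [List.not_mem_nil, false_iff]
      rintro ⟨d, h1, h2, h3, h4, h5⟩
      nlinarith

lemma sorted_smalls (n i : Int) : 1 ≤ i → (smalls n i).Pairwise (· < ·) := by
  fun_induction smalls n i with
  | case1 i h hmod IH =>
      intro hi
      refine List.Pairwise.cons ?_ (IH (by omega))
      intro y hy
      have := (mem_smalls n (i + 1) y (by omega)).mp hy
      omega
  | case2 i h hmod IH => intro hi; exact IH (by omega)
  | case3 i h => intro _; exact List.Pairwise.nil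

-- cofactors shrink strictly as the small divisor grows
lemma cof_lt (n i d : Int) (hi : 1 ≤ i) (hd : i < d)
    (hin : PySem.Int.mod n i = 0) (hdn : PySem.Int.mod n d = 0) (hsq : d * d ≤ n) :
    PySem.Int.floordiv n d < PySem.Int.floordiv n i := by
  have hi0 : (0 : Int) < i := by omega
  have hd0 : (0 : Int) < d := by omega
  rw [PySem.Int.floordiv_eq_ediv_of_pos hd0, PySem.Int.floordiv_eq_ediv_of_pos hi0]
  have h1 : i ∣ n := (PySem.Int.mod_eq_zero_iff_dvd n i).mp hin
  have h2 : d ∣ n := (PySem.Int.mod_eq_zero_iff_dvd n d).mp hdn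
  have hn : 0 < n := by nlinarith
  have e1 : n / i * i = n := Int.ediv_mul_cancel h1
  have e2 : n / d * d = n := Int.ediv_mul_cancel h2
  have p2 : 0 < n / d := by
    by_contra hc
    push Not at hc
    nlinarith
  by_contra hc
  push Not at hc
  nlinarith

-- a cofactor n // d distinct from d lies strictly above the square root
lemma cof_sq_gt (n d : Int) (hd : 1 ≤ d) (hmod : PySem.Int.mod n d = 0)
    (hsq : d * d ≤ n) (hne : PySem.Int.floordiv n d ≠ d) :
    n < PySem.Int.floordiv n d * PySem.Int.floordiv n d ∧
      1 ≤ PySem.Int.floordiv n d ∧ PySem.Int.floordiv n d ≤ n ∧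
      PySem.Int.mod n (PySem.Int.floordiv n d) = 0 := by
  have hd0 : (0 : Int) < d := by omega
  rw [PySem.Int.floordiv_eq_ediv_of_pos hd0] at hne ⊢
  have h2 : d ∣ n := (PySem.Int.mod_eq_zero_iff_dvd n d).mp hmod
  have hn : 0 < n := by nlinarith
  have e2 : n / d * d = n := Int.ediv_mul_cancel h2
  have hdt : d ≤ n / d := by nlinarith [mul_pos hd0 hd0]
  have hlt : d < n / d := lt_of_le_of_ne hdt (fun hEq => hne hEq.symm)
  refine ⟨by nlinarith, by omega, by nlinarith, ?_⟩
  rw [PySem.Int.mod_eq_zero_iff_dvd]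
  exact ⟨d, by linarith [e2.symm, mul_comm (n / d) d]⟩

-- every divisor above the square root is the cofactor of one below it
lemma large_of_div (n x : Int) (hx : 1 ≤ x) (hxn : x ≤ n)
    (hmod : PySem.Int.mod n x = 0) (hsq : n < x * x) :
    ∃ d, 1 ≤ d ∧ d * d ≤ n ∧ PySem.Int.mod n d = 0 ∧
      PySem.Int.floordiv n d ≠ d ∧ x = PySem.Int.floordiv n d := by
  have hx0 : (0 : Int) < x := by omega
  have hn : 0 < n := by omega
  have h2 : x ∣ n := (PySem.Int.mod_eq_zero_iff_dvd n x).mp hmod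
  refine ⟨PySem.Int.floordiv n x, ?_⟩
  rw [PySem.Int.floordiv_eq_ediv_of_pos hx0]
  set d := n / x with hdDef
  have e2 : d * x = n := Int.ediv_mul_cancel h2
  have hd1 : 1 ≤ d := by
    by_contra hc
    push Not at hc
    nlinarith
  have hdx : d < x := by nlinarith
  have hddvd : d ∣ n := ⟨x, e2.symm⟩
  have hd0' : (0 : Int) < d := lt_of_lt_of_le zero_lt_one hd1
  have hfd : PySem.Int.floordiv n d = x := by
    rw [PySem.Int.floordiv_eq_ediv_of_pos hd0', ← e2]
    exact Int.mul_ediv_cancel_left x hd0'.ne'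
  refine ⟨hd1, by nlinarith, (PySem.Int.mod_eq_zero_iff_dvd n d).mpr hddvd, ?_, hfd.symm⟩
  rw [hfd]
  omega

lemma sorted_larges (n i : Int) : 1 ≤ i → (larges n i).Pairwise (· > ·) := by
  fun_induction larges n i with
  | case1 i h hmod hj IH =>
      intro hi
      refine List.Pairwise.cons ?_ (IH (by omega))
      intro y hy
      obtain ⟨d, h1, h2, h3, h4, h5⟩ := (mem_larges n (i + 1) y (by omega)).mp hy
      simp only [beq_iff_eq] at hmod
      have := cof_lt n i d hi (by omega) hmod h3 h2
      simpa [h5] using this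
  | case2 i h hmod hj IH => intro hi; exact IH (by omega)
  | case3 i h hmod IH => intro hi; exact IH (by omega)
  | case4 i h => intro _; exact List.Pairwise.nil

lemma pairwise_pyRange_one (a b : Int) : (PySem.List.pyRange a b 1).Pairwise (· < ·) := by
  have H : ∀ (k : Nat) (a : Int), (b - a).toNat = k → (PySem.List.pyRange a b 1).Pairwise (· < ·) := by
    intro k
    induction k with
    | zero =>
        intro a hk
        have hempty : PySem.List.pyRange a b 1 = [] := by
          rw [List.eq_nil_iff_forall_not_mem]
          intro x hx
          have := PySem.List.mem_pyRange_one.mp hx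
          omega
        rw [hempty]
        exact List.Pairwise.nil
    | succ k IH =>
        intro a hk
        have hab : a < b := by omega
        rw [PySem.List.pyRange_one_cons hab]
        refine List.Pairwise.cons ?_ (IH (a + 1) (by omega))
        intro y hy
        have := PySem.List.mem_pyRange_one.mp hy
        omega
  exact H (b - a).toNat a rfl

-- the divisor lists of the two programs coincide
lemma div_lists_eq (n : Int) :
    smalls n 1 ++ (larges n 1).reverse
      = (PySem.List.pyRange 1 (n + 1) 1).filter (fun i => PySem.Int.mod n i == 0) := by
  have hs1 : (smalls n 1 ++ (larges n 1).reverse).Pairwise (· < ·) := by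
    rw [List.pairwise_append]
    refine ⟨sorted_smalls n 1 le_rfl, List.pairwise_reverse.mpr (sorted_larges n 1 le_rfl), ?_⟩
    intro s hs t ht
    obtain ⟨hs1', hs2', hs3'⟩ := (mem_smalls n 1 s le_rfl).mp hs
    rw [List.mem_reverse] at ht
    obtain ⟨d, hd1, hd2, hd3, hd4, hd5⟩ := (mem_larges n 1 t le_rfl).mp ht
    obtain ⟨hq, ht1, _, _⟩ := cof_sq_gt n d hd1 hd3 hd2 hd4
    rw [← hd5] at hq ht1
    nlinarith
  have hs2 : ((PySem.List.pyRange 1 (n + 1) 1).filter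
      (fun i => PySem.Int.mod n i == 0)).Pairwise (· < ·) :=
    (pairwise_pyRange_one 1 (n + 1)).filter _
  have hmem : ∀ x, x ∈ smalls n 1 ++ (larges n 1).reverse ↔
      x ∈ (PySem.List.pyRange 1 (n + 1) 1).filter (fun i => PySem.Int.mod n i == 0) := by
    intro x
    rw [List.mem_append, List.mem_reverse, mem_smalls n 1 x le_rfl,
      mem_larges n 1 x le_rfl, List.mem_filter]
    simp only [PySem.List.mem_pyRange_one, beq_iff_eq]
    constructor
    · rintro (⟨h1, h2, h3⟩ | ⟨d, h1, h2, h3, h4, h5⟩)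
      · exact ⟨⟨h1, by nlinarith⟩, h3⟩
      · obtain ⟨hq, ht1, ht2, ht3⟩ := cof_sq_gt n d h1 h3 h2 h4
        rw [← h5] at ht1 ht2 ht3
        exact ⟨⟨ht1, by omega⟩, ht3⟩
    · rintro ⟨⟨h1, h2⟩, h3⟩
      by_cases hsq : x * x ≤ n
      · exact Or.inl ⟨h1, hsq, h3⟩
      · exact Or.inr (large_of_div n x h1 (by omega) h3 (by omega))
  exact List.Perm.eq_of_pairwise (fun a b _ _ h1 h2 => absurd h2 (asymm h1)) hs1 hs2
    ((List.perm_ext_iff_of_nodup (hs1.imp ne_of_lt) (hs2.imp ne_of_lt)).mpr hmem)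

-- ===== VERDICT (by name: the statement is the Claim_ definition above) =====
theorem sc_spec : Claim_equal_sc := by
  intro n _
  unfold Spec_sc sc sc_alt
  dsimp only
  rw [scAltLoop_eq, List.nil_append, List.nil_append]
  dsimp only
  rw [div_lists_eq, List.filter_filter]
  have hbody : (fun (result : List Int) (i : Int) =>
      if (PySem.Int.mod n i == 0) = true then
        (if PySem.Chars.isIn (pyBinTail i) (pyBinTail n) = true then result ++ [i] else result)
      else result)
      = (fun (result : List Int) (i : Int) =>
        if (PySem.Chars.isIn (pyBinTail i) (pyBinTail n) && (PySem.Int.mod n i == 0)) = true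
        then result ++ [i] else result) := by
    funext r i
    by_cases h1 : (PySem.Int.mod n i == 0) = true <;>
      by_cases h2 : PySem.Chars.isIn (pyBinTail i) (pyBinTail n) = true <;>
      simp [h1, h2]
  rw [hbody, PySem.List.foldl_append_if_eq_filter, List.nil_append]
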